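-- pv_equiv track=rewrite | github.com/Superdupersupersuper/funnylolhaha | fix_missing_transcripts.py | _parse_speaker_sections
-- ===== SOURCE A (Python) =====
-- from typing import List, Dict, Optional, Tuple
--
-- def _parse_speaker_sections(text: str) -> List[Dict]:
--     """
--     Parse text into speaker sections
--
--     Handles formats like:
--     - SPEAKER NAME: text
--     - Speaker Name\ntext
--     - Speaker Name (timestamp)\ntext
--     """
--     dialogue = []
--     lines = text.split('\n')
--
--     current_speaker = None
--     current_text = []
--
--     for line in lines:
--         line = line.strip()
--         if not line:
--             continue
--
--         # Check if line is a speaker name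
--         # Pattern 1: "NAME:" or "NAME (timestamp):"
--         if ':' in line:
--             parts = line.split(':', 1)
--             potential_speaker = parts[0].strip()
--
--             # Speaker names are typically short (1-4 words)
--             if len(potential_speaker.split()) <= 4:
--                 # Save previous speaker's text
--                 if current_speaker and current_text:
--                     dialogue.append({
--                         'speaker': current_speaker,
--                         'text': ' '.join(current_text),
--                         'timestamp': ''
--                     })
--
--                 # Start new speaker
--                 current_speaker = potential_speaker
--                 remaining_text = parts[1].strip() if len(parts) > 1 else ''
--                 current_text = [remaining_text] if remaining_text else []
--                 continue
--
--         # Pattern 2: ALL CAPS line (likely speaker)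
--         if line.isupper() and len(line.split()) <= 4:
--             # Save previous
--             if current_speaker and current_text:
--                 dialogue.append({
--                     'speaker': current_speaker,
--                     'text': ' '.join(current_text),
--                     'timestamp': ''
--                 })
--
--             current_speaker = line
--             current_text = []
--             continue
--
--         # Otherwise, it's dialogue text
--         if current_speaker:
--             current_text.append(line)
--
--     # Don't forget last speaker
--     if current_speaker and current_text:
--         dialogue.append({
--             'speaker': current_speaker,
--             'text': ' '.join(current_text),
--             'timestamp': ''
--         })
--
--     return dialogue
-- ===== SOURCE B (Python) =====
-- def _parse_speaker_sections(text):
--     # Pass 1: tokenize -- each non-blank stripped line becomes either a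
--     # speaker token (True, name, initial_text) or a plain-text token (False, line, '').
--     tokens = []
--     for raw in text.split('\n'):
--         line = raw.strip()
--         if not line:
--             continue
--         if ':' in line:
--             parts = line.split(':', 1)
--             name = parts[0].strip()
--             if len(name.split()) <= 4:
--                 tokens.append((True, name, parts[1].strip()))
--                 continue
--         if line.isupper() and len(line.split()) <= 4:
--             tokens.append((True, line, ''))
--         else:
--             tokens.append((False, line, ''))
--
--     # Pass 2: group tokens into sections (name, text_parts); a speaker token
--     # opens a new section, a text token extends the latest one.
--     sections = []
--     for is_speaker, a, b in tokens:
--         if is_speaker: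
--             sections.append((a, [b] if b else []))
--         elif sections:
--             sections[-1][1].append(a)
--
--     # Pass 3: render, keeping only sections with a non-empty name and some text.
--     return [
--         {'speaker': name, 'text': ' '.join(parts), 'timestamp': ''}
--         for name, parts in sections
--         if name and parts
--     ]
-- ===== Notes on version B (the rewrite author's own statement) =====
-- stated objective: alternative
-- what changed: Replaces A's single stateful loop with triplicated flush blocks by a three-pass pipeline: tokenize lines into speaker/text tokens, group tokens into (name, parts) sections, then render with one filter+map; no emission-on-switch state machine remains.
import Mathlib
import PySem

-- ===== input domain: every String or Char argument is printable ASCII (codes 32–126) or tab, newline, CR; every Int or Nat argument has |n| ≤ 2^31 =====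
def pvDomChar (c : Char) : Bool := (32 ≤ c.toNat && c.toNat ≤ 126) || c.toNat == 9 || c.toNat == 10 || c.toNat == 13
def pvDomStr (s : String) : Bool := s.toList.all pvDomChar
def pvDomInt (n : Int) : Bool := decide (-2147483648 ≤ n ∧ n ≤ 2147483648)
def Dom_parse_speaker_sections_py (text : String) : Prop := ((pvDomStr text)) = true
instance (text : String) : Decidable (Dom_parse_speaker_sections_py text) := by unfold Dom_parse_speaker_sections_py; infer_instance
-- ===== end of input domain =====

-- B replaces A's one stateful loop (flush block repeated three times) by a tokenize → group → render pipeline; same cost, plainer structure. Return value only; no mutation involved.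

-- str.isupper() for one string: some cased char and no lowercase one (exact on the ASCII domain)
def pyStrIsupper (s : String) : Bool :=
  (s.toList.any PySem.Chars.isupper) && !(s.toList.any PySem.Chars.islower)

-- the dict literal {'speaker': sp, 'text': ' '.join(txt), 'timestamp': ''} (built identically by both Pythons)
def pvMkEntry (sp : String) (txt : List String) : List (String × String) :=
  [("speaker", sp), ("text", PySem.Str.join " " txt), ("timestamp", "")]

-- ===== PORT A =====
-- truthiness of current_speaker (None or '' are falsy)
def pvTruthy (o : Option String) : Bool :=
  match o with
  | none => false
  | some s => s ≠ ""

-- A's loop body, one line at a time, state = (dialogue, current_speaker, current_text)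
def pvStepA (st : List (List (String × String)) × Option String × List String) (raw : String) :
    List (List (String × String)) × Option String × List String :=
  let (dialogue, current_speaker, current_text) := st
  let line := PySem.Str.strip raw
  if line = "" then st
  else
    let colon :
        Option (List (List (String × String)) × Option String × List String) :=
      if PySem.Str.isIn ":" line then
        let parts := (PySem.Str.splitMax? line ":" 1).getD []
        let potential := PySem.Str.strip (parts.headD "")
        if (PySem.Str.split₀ potential).length ≤ 4 then
          let dialogue :=
            if pvTruthy current_speaker && !current_text.isEmpty then
              dialogue ++ [pvMkEntry (current_speaker.getD "") current_text]
            else dialogue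
          let remaining :=
            if parts.length > 1 then PySem.Str.strip (parts.getD 1 "") else ""
          some (dialogue, some potential, if remaining ≠ "" then [remaining] else [])
        else none
      else none
    match colon with
    | some st' => st'
    | none =>
      if pyStrIsupper line && (PySem.Str.split₀ line).length ≤ 4 then
        let dialogue :=
          if pvTruthy current_speaker && !current_text.isEmpty then
            dialogue ++ [pvMkEntry (current_speaker.getD "") current_text]
          else dialogue
        (dialogue, some line, [])
      else if pvTruthy current_speaker then (dialogue, current_speaker, current_text ++ [line])
      else st

def parse_speaker_sections_py (text : String) : List (List (String × String)) :=
  let lines := (PySem.Str.split? text "\n").getD []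
  let st := lines.foldl pvStepA ([], none, [])
  if pvTruthy st.2.1 && !st.2.2.isEmpty then st.1 ++ [pvMkEntry (st.2.1.getD "") st.2.2]
  else st.1

-- ===== PORT B =====
-- pass 1 loop body: classify one raw line into the token list (skip blank lines)
def pvClassifyB (toks : List (Bool × String × String)) (raw : String) :
    List (Bool × String × String) :=
  let line := PySem.Str.strip raw
  if line = "" then toks
  else
    let colon : Option (Bool × String × String) :=
      if PySem.Str.isIn ":" line then
        let parts := (PySem.Str.splitMax? line ":" 1).getD []
        let name := PySem.Str.strip (parts.headD "")
        if (PySem.Str.split₀ name).length ≤ 4 then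
          some (true, name, PySem.Str.strip (parts.getD 1 ""))
        else none
      else none
    match colon with
    | some t => toks ++ [t]
    | none =>
      if pyStrIsupper line && (PySem.Str.split₀ line).length ≤ 4 then
        toks ++ [(true, line, "")]
      else toks ++ [(false, line, "")]

-- sections[-1][1].append(a) (no-op on an empty sections list, as in B)
def pvAppendLast (secs : List (String × List String)) (a : String) :
    List (String × List String) :=
  match secs.getLast? with
  | none => secs
  | some (n, p) => secs.dropLast ++ [(n, p ++ [a])]

-- pass 2 loop body: a speaker token opens a section, a text token extends the last one
def pvBuildSecs (secs : List (String × List String)) (t : Bool × String × String) :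
    List (String × List String) :=
  if t.1 then secs ++ [(t.2.1, if t.2.2 ≠ "" then [t.2.2] else [])]
  else pvAppendLast secs t.2.1

-- pass 3: keep sections with a non-empty name and some text
def pvRender (secs : List (String × List String)) : List (List (String × String)) :=
  (secs.filter (fun s => s.1 ≠ "" && !s.2.isEmpty)).map (fun s => pvMkEntry s.1 s.2)

def parse_speaker_sections_py_alt (text : String) : List (List (String × String)) :=
  let lines := (PySem.Str.split? text "\n").getD []
  let tokens := lines.foldl pvClassifyB []
  let sections := tokens.foldl pvBuildSecs []
  pvRender sections

-- ===== PRECONDITION & SPEC =====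
def Spec_parse_speaker_sections_py (text : String) (out : List (List (String × String))) : Prop := out = parse_speaker_sections_py_alt text
instance (text : String) (out : List (List (String × String))) : Decidable (Spec_parse_speaker_sections_py text out) := by unfold Spec_parse_speaker_sections_py; infer_instance

-- ===== CLAIM (what is proved, stated in full; the proofs are below) =====
def Claim_equal_parse_speaker_sections_py : Prop := ∀ (text : String), Dom_parse_speaker_sections_py text → Spec_parse_speaker_sections_py text (parse_speaker_sections_py text)

-- ===== LEMMAS AND PROOFS =====

-- proof-side normal form: what one raw line contributes (none = blank line skipped)
def pvTokenOf (raw : String) : Option (Bool × String × String) :=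
  let line := PySem.Str.strip raw
  if line = "" then none
  else
    let colon : Option (Bool × String × String) :=
      if PySem.Str.isIn ":" line then
        let parts := (PySem.Str.splitMax? line ":" 1).getD []
        let name := PySem.Str.strip (parts.headD "")
        if (PySem.Str.split₀ name).length ≤ 4 then
          some (true, name, PySem.Str.strip (parts.getD 1 ""))
        else none
      else none
    match colon with
    | some t => some t
    | none =>
      if pyStrIsupper line && (PySem.Str.split₀ line).length ≤ 4 then
        some (true, line, "")
      else some (false, line, "")

-- A's loop body restated on a token
def pvStepTok (st : List (List (String × String)) × Option String × List String)
    (t : Bool × String × String) :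
    List (List (String × String)) × Option String × List String :=
  let (dialogue, current_speaker, current_text) := st
  if t.1 then
    ((if pvTruthy current_speaker && !current_text.isEmpty then
        dialogue ++ [pvMkEntry (current_speaker.getD "") current_text]
      else dialogue),
     some t.2.1,
     if t.2.2 ≠ "" then [t.2.2] else [])
  else if pvTruthy current_speaker then (dialogue, current_speaker, current_text ++ [t.2.1])
  else st

def pvFlush (spk : Option String) (txt : List String) : List (List (String × String)) :=
  if pvTruthy spk && !txt.isEmpty then [pvMkEntry (spk.getD "") txt] else []

def pvFinal (st : List (List (String × String)) × Option String × List String) :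
    List (List (String × String)) :=
  st.1 ++ pvFlush st.2.1 st.2.2

-- relation between A's (speaker, text) state and B's current (last) section
def pvRel (spk : Option String) (txt : List String) (secs : List (String × List String)) : Prop :=
  (spk = none ∧ secs = []) ∨
  (spk = some "" ∧ ∃ p, secs = [("", p)]) ∨
  (∃ s, s ≠ "" ∧ spk = some s ∧ secs = [(s, txt)])

lemma final_eq (st : List (List (String × String)) × Option String × List String) :
    (if pvTruthy st.2.1 && !st.2.2.isEmpty then st.1 ++ [pvMkEntry (st.2.1.getD "") st.2.2]
     else st.1) = pvFinal st := by
  unfold pvFinal pvFlush; split_ifs <;> simp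

lemma strip_empty : PySem.Str.strip "" = "" := by decide

lemma stepA_eq (st : List (List (String × String)) × Option String × List String) (raw : String) :
    pvStepA st raw = match pvTokenOf raw with
      | none => st
      | some t => pvStepTok st t := by
  obtain ⟨dia, spk, txt⟩ := st
  simp only [pvStepA, pvTokenOf, pvStepTok]
  split_ifs <;> simp_all [strip_empty]

lemma classifyB_eq (toks : List (Bool × String × String)) (raw : String) :
    pvClassifyB toks raw = match pvTokenOf raw with
      | none => toks
      | some t => toks ++ [t] := by
  simp only [pvClassifyB, pvTokenOf]
  split_ifs <;> simp_all

lemma foldA_eq (lines : List String) (st : List (List (String × String)) × Option String × List String) :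
    lines.foldl pvStepA st = (lines.filterMap pvTokenOf).foldl pvStepTok st := by
  induction lines generalizing st with
  | nil => rfl
  | cons l ls ih =>
    simp only [List.foldl_cons, List.filterMap_cons, stepA_eq]
    cases pvTokenOf l <;> simp [ih]

lemma foldB_eq (lines : List String) (toks : List (Bool × String × String)) :
    lines.foldl pvClassifyB toks = toks ++ lines.filterMap pvTokenOf := by
  induction lines generalizing toks with
  | nil => simp
  | cons l ls ih =>
    simp only [List.foldl_cons, List.filterMap_cons, classifyB_eq]
    cases pvTokenOf l <;> simp [ih]

lemma appendLast_append (pre S : List (String × List String)) (a : String) (hS : S ≠ []) :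
    pvAppendLast (pre ++ S) a = pre ++ pvAppendLast S a := by
  unfold pvAppendLast
  rw [List.getLast?_append]
  cases h : S.getLast? with
  | none => exact absurd (List.getLast?_eq_none_iff.mp h) hS
  | some x =>
    obtain ⟨n, p⟩ := x
    rw [List.dropLast_append]
    simp [List.isEmpty_eq_false_iff.mpr hS, List.append_assoc]

lemma appendLast_ne_nil (S : List (String × List String)) (a : String) (hS : S ≠ []) :
    pvAppendLast S a ≠ [] := by
  unfold pvAppendLast
  cases h : S.getLast? with
  | none => exact hS
  | some x => obtain ⟨n, p⟩ := x; simp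

lemma buildSecs_prefix (ts : List (Bool × String × String))
    (pre S : List (String × List String)) (hS : S ≠ []) :
    ts.foldl pvBuildSecs (pre ++ S) = pre ++ ts.foldl pvBuildSecs S := by
  induction ts generalizing S with
  | nil => rfl
  | cons t ts ih =>
    simp only [List.foldl_cons]
    by_cases ht : t.1
    · rw [pvBuildSecs, pvBuildSecs, if_pos ht, if_pos ht, List.append_assoc]
      exact ih _ (by simp)
    · rw [pvBuildSecs, pvBuildSecs, if_neg ht, if_neg ht, appendLast_append _ _ _ hS]
      exact ih _ (appendLast_ne_nil _ _ hS)

lemma render_append (a b : List (String × List String)) :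
    pvRender (a ++ b) = pvRender a ++ pvRender b := by
  unfold pvRender; simp

lemma flush_eq_render (spk : Option String) (txt : List String)
    (secs : List (String × List String)) (h : pvRel spk txt secs) :
    pvFlush spk txt = pvRender secs := by
  rcases h with ⟨h1, h2⟩ | ⟨h1, p, h2⟩ | ⟨s, hs, h1, h2⟩ <;> subst h1 <;> subst h2
  · simp [pvFlush, pvRender, pvTruthy]
  · simp [pvFlush, pvRender, pvTruthy]
  · by_cases ht : txt.isEmpty <;> simp [pvFlush, pvRender, pvTruthy, hs, ht]

lemma main_lemma (ts : List (Bool × String × String))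
    (dia : List (List (String × String))) (spk : Option String) (txt : List String)
    (secs : List (String × List String)) (h : pvRel spk txt secs) :
    pvFinal (ts.foldl pvStepTok (dia, spk, txt)) = dia ++ pvRender (ts.foldl pvBuildSecs secs) := by
  induction ts generalizing dia spk txt secs with
  | nil =>
    simp only [List.foldl_nil, pvFinal]
    rw [flush_eq_render _ _ _ h]
  | cons t ts ih =>
    simp only [List.foldl_cons]
    by_cases ht : t.1
    · have hstep : pvStepTok (dia, spk, txt) t =
          (dia ++ pvFlush spk txt, some t.2.1, if t.2.2 ≠ "" then [t.2.2] else []) := by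
        unfold pvStepTok pvFlush
        simp only [ht, reduceIte]
        split_ifs <;> simp
      have hbuild : pvBuildSecs secs t =
          secs ++ [(t.2.1, if t.2.2 ≠ "" then [t.2.2] else [])] := by
        unfold pvBuildSecs; rw [if_pos ht]
      rw [hstep, hbuild, buildSecs_prefix _ _ _ (by simp), render_append,
        flush_eq_render _ _ _ h]
      have hrel : pvRel (some t.2.1) (if t.2.2 ≠ "" then [t.2.2] else [])
          [(t.2.1, if t.2.2 ≠ "" then [t.2.2] else [])] := by
        by_cases hn : t.2.1 = ""
        · exact Or.inr (Or.inl ⟨by rw [hn], _, by rw [hn]⟩)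
        · exact Or.inr (Or.inr ⟨t.2.1, hn, rfl, rfl⟩)
      rw [ih _ _ _ _ hrel, List.append_assoc]
    · have hbuild : pvBuildSecs secs t = pvAppendLast secs t.2.1 := by
        unfold pvBuildSecs; rw [if_neg ht]
      rcases h with ⟨h1, h2⟩ | ⟨h1, p, h2⟩ | ⟨s, hs, h1, h2⟩ <;> subst h1 <;> subst h2
      · have hstep : pvStepTok (dia, none, txt) t = (dia, none, txt) := by
          unfold pvStepTok; simp [ht, pvTruthy]
        rw [hstep, hbuild]
        exact ih _ _ _ _ (Or.inl ⟨rfl, by simp [pvAppendLast]⟩)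
      · have hstep : pvStepTok (dia, some "", txt) t = (dia, some "", txt) := by
          unfold pvStepTok; simp [ht, pvTruthy]
        rw [hstep, hbuild]
        exact ih _ _ _ _ (Or.inr (Or.inl ⟨rfl, p ++ [t.2.1], by simp [pvAppendLast]⟩))
      · have hstep : pvStepTok (dia, some s, txt) t = (dia, some s, txt ++ [t.2.1]) := by
          unfold pvStepTok; simp [ht, pvTruthy, hs]
        rw [hstep, hbuild]
        exact ih _ _ _ _ (Or.inr (Or.inr ⟨s, hs, rfl, by simp [pvAppendLast]⟩))

-- ===== VERDICT (by name: the statement is the Claim_ definition above) =====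
theorem parse_speaker_sections_py_spec : Claim_equal_parse_speaker_sections_py := by
  intro text _
  unfold Spec_parse_speaker_sections_py parse_speaker_sections_py parse_speaker_sections_py_alt
  simp only [foldA_eq, foldB_eq, List.nil_append, final_eq]
  exact main_lemma _ [] none [] [] (Or.inl ⟨rfl, rfl⟩)
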